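-- pv_equiv track=rewrite | github.com/snoyes/skyscrapers | tools.py | cyclicEquiv
-- ===== SOURCE A (Python) =====
-- def cyclicEquiv(u, v):
--     # 2019-07-29, https://stackoverflow.com/questions/31000591/check-if-a-list-is-a-rotation-of-another-list-that-works-with-duplicates
--     n = len(u)
--     if n != len(v):
--         return False
--
--     i = j = 0
--     while i < n and j < n:
--         k = 1
--         while k <= n and u[(i + k) % n] == v[(j + k) % n]:
--             k += 1
--         if k > n:
--             return True
--         if u[(i + k) % n] > v[(j + k) % n]:
--             i += k
--         else:
--             j += k
--     return False
-- ===== SOURCE B (Python) =====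
-- def cyclicEquiv(u, v):
--     n = len(u)
--     if n != len(v):
--         return False
--     return any(u[i:] + u[:i] == v for i in range(n))
-- ===== Notes on version B (the rewrite author's own statement) =====
-- stated objective: simpler
-- what changed: Replaces A's two-pointer lexicographic skipping loop with a direct brute-force test comparing each of the n rotations u[i:]+u[:i] against v.
import Mathlib
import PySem

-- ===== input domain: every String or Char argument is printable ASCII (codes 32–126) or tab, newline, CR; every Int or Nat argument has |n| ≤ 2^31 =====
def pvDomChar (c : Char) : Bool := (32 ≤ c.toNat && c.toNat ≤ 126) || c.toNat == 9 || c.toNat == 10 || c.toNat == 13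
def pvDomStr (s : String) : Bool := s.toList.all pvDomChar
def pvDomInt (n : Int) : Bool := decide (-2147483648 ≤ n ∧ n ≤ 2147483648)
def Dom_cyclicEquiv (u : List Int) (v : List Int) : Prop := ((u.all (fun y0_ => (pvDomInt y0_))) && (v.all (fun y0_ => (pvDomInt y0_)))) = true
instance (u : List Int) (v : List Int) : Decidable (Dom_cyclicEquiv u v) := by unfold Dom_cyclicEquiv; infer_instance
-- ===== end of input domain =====

-- B replaces A's two-pointer lexicographic-skipping loop with a direct brute-force
-- comparison of every rotation of u against v (objective: simpler).

-- ===== PORT A =====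
-- list indexing u[(i+k)%n]: whenever the loops run, n ≥ 1 and 0 ≤ (i+k)%n < n = len(u),
-- so the index is always in range and getD is exact here
def pvGet (u : List Int) (m : Nat) : Int := u.getD m 0

-- inner while loop of A: advances k while k <= n and u[(i+k)%n] == v[(j+k)%n]; returns final k
def pvInner (u v : List Int) (n i j : Nat) (k : Nat) : Nat :=
  if h : k ≤ n ∧ pvGet u ((i + k) % n) = pvGet v ((j + k) % n) then
    pvInner u v n i j (k + 1)
  else k
termination_by n + 1 - k
decreasing_by omega

-- the inner loop's result is at least its starting k (cited by pvOuter's decreasing_by)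
theorem pvInner_ge (u v : List Int) (n i j k : Nat) : k ≤ pvInner u v n i j k := by
  fun_induction pvInner u v n i j k with
  | case1 k h ih => omega
  | case2 k h => exact le_refl k

-- outer while loop of A
def pvOuter (u v : List Int) (n i j : Nat) : Bool :=
  if _h : i < n ∧ j < n then
    let k := pvInner u v n i j 1
    if n < k then true
    else if pvGet u ((i + k) % n) > pvGet v ((j + k) % n) then pvOuter u v n (i + k) j
    else pvOuter u v n i (j + k)
  else false
termination_by (n - i) + (n - j)
decreasing_by
  · have := pvInner_ge u v n i j 1; omega
  · have := pvInner_ge u v n i j 1; omega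

def cyclicEquiv (u : List Int) (v : List Int) : Bool :=
  let n := u.length
  if n ≠ v.length then false
  else pvOuter u v n 0 0

-- ===== PORT B =====
-- u[i:] = u.drop i and u[:i] = u.take i (exact for 0 ≤ i ≤ len(u))
def cyclicEquiv_alt (u : List Int) (v : List Int) : Bool :=
  let n := u.length
  if n ≠ v.length then false
  else (List.range n).any (fun i => (u.drop i ++ u.take i) == v)

-- ===== PRECONDITION & SPEC =====
def Spec_cyclicEquiv (u : List Int) (v : List Int) (out : Bool) : Prop := out = cyclicEquiv_alt u v
instance (u : List Int) (v : List Int) (out : Bool) : Decidable (Spec_cyclicEquiv u v out) := by unfold Spec_cyclicEquiv; infer_instance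

-- ===== CLAIM (what is proved, stated in full; the proofs are below) =====
def Claim_equal_cyclicEquiv : Prop := ∀ (u : List Int) (v : List Int), Dom_cyclicEquiv u v → Spec_cyclicEquiv u v (cyclicEquiv u v)

-- ===== LEMMAS AND PROOFS =====

theorem pvModAddL (a b n : Nat) : (a % n + b) % n = (a + b) % n := by
  conv_lhs => rw [Nat.add_mod]
  conv_rhs => rw [Nat.add_mod]
  rw [Nat.mod_mod_of_dvd _ dvd_rfl]

theorem pvModAddR (a b n : Nat) : (a + b % n) % n = (a + b) % n := by
  conv_lhs => rw [Nat.add_mod]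
  conv_rhs => rw [Nat.add_mod]
  rw [Nat.mod_mod_of_dvd _ dvd_rfl]

-- reading the rotation of u that starts at s through getD
theorem getD_rot (u : List Int) (n s m : Nat) (hn : u.length = n) (hs : s < n) (hm : m < n) :
    (u.drop s ++ u.take s).getD m 0 = u.getD ((s + m) % n) 0 := by
  have hm' : m < (u.drop s ++ u.take s).length := by simp; omega
  rw [List.getD_eq_getElem _ 0 hm']
  rcases Nat.lt_or_ge m (n - s) with hc | hc
  · rw [List.getElem_append_left (by simp; omega)]
    rw [List.getElem_drop]
    have h1 : (s + m) % n = s + m := Nat.mod_eq_of_lt (by omega)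
    rw [h1, List.getD_eq_getElem _ 0 (by omega)]
  · rw [List.getElem_append_right (by simp; omega)]
    rw [List.getElem_take]
    have h1 : (s + m) % n = m - (u.drop s).length := by
      rw [Nat.mod_eq_sub_mod (by omega), Nat.mod_eq_of_lt (by omega)]
      simp; omega
    rw [h1, List.getD_eq_getElem _ 0 (by simp; omega)]

-- a pointwise cyclic shift of the entries is a list rotation
theorem rot_of_cyc (u v : List Int) (n r : Nat) (hn : u.length = n) (hv : v.length = n)
    (h0 : 0 < n) (h : ∀ m, m < n → v.getD m 0 = u.getD ((r + m) % n) 0) :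
    u.drop (r % n) ++ u.take (r % n) = v := by
  have hs : r % n < n := Nat.mod_lt _ h0
  apply List.ext_getElem (by simp; omega)
  intro m hm1 hm2
  have hmn : m < n := by omega
  rw [← List.getD_eq_getElem _ 0 hm1, ← List.getD_eq_getElem _ 0 hm2]
  rw [getD_rot u n (r % n) m hn hs hmn, h m hmn, pvModAddL]

-- positions the inner loop passed over agree
theorem pvInner_match (u v : List Int) (n i j : Nat) (k0 : Nat) :
    ∀ d, k0 ≤ d → d < pvInner u v n i j k0 → pvGet u ((i + d) % n) = pvGet v ((j + d) % n) := by
  fun_induction pvInner u v n i j k0 with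
  | case1 k h ih =>
    intro d hd1 hd2
    rcases Nat.eq_or_lt_of_le hd1 with rfl | hlt
    · exact h.2
    · exact ih d hlt hd2
  | case2 k h =>
    intro d hd1 hd2
    omega

-- if the inner loop stopped at k ≤ n, position k is a genuine mismatch
theorem pvInner_stop (u v : List Int) (n i j : Nat) (k0 : Nat)
    (h : pvInner u v n i j k0 ≤ n) :
    pvGet u ((i + pvInner u v n i j k0) % n) ≠ pvGet v ((j + pvInner u v n i j k0) % n) := by
  fun_induction pvInner u v n i j k0 with
  | case1 k hc ih => exact ih h
  | case2 k hc =>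
    intro heq
    exact hc ⟨h, heq⟩

-- soundness of A's loop: if it answers true, v is a rotation of u
theorem pvOuter_sound (u v : List Int) (n : Nat) (hn : u.length = n) (hv : v.length = n)
    (i j : Nat) : pvOuter u v n i j = true → ∃ s, s < n ∧ u.drop s ++ u.take s = v := by
  fun_induction pvOuter u v n i j with
  | case1 i j h k hk =>
    intro _
    have h0 : 0 < n := by omega
    have hk' : n < pvInner u v n i j 1 := hk
    have hmatch : ∀ d, 1 ≤ d → d ≤ n → pvGet u ((i + d) % n) = pvGet v ((j + d) % n) :=
      fun d h1 h2 => pvInner_match u v n i j 1 d h1 (by omega)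
    have hJ : j % n < n := Nat.mod_lt _ h0
    refine ⟨(i + (n - j % n)) % n, Nat.mod_lt _ h0,
      rot_of_cyc u v n (i + (n - j % n)) hn hv h0 ?_⟩
    intro m hm
    rcases Nat.lt_or_ge (j % n) m with hc | hc
    · have hd1 : (1:Nat) ≤ m - j % n := by omega
      have hd2 : m - j % n ≤ n := by omega
      have h1 : (j + (m - j % n)) % n = m := by
        rw [← pvModAddL]
        have : j % n + (m - j % n) = m := by omega
        rw [this, Nat.mod_eq_of_lt hm]
      have h2 : (i + (m - j % n)) % n = (i + (n - j % n) + m) % n := by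
        have : i + (n - j % n) + m = (i + (m - j % n)) + n := by omega
        rw [this, Nat.add_mod_right]
      have := hmatch (m - j % n) hd1 hd2
      rw [h1, h2] at this
      exact this.symm
    · have hd1 : (1:Nat) ≤ n - j % n + m := by omega
      have hd2 : n - j % n + m ≤ n := by omega
      have h1 : (j + (n - j % n + m)) % n = m := by
        rw [← pvModAddL]
        have : j % n + (n - j % n + m) = n + m := by omega
        rw [this, Nat.add_mod_left, Nat.mod_eq_of_lt hm]
      have h2 : (i + (n - j % n + m)) % n = (i + (n - j % n) + m) % n := by
        have : i + (n - j % n + m) = i + (n - j % n) + m := by omega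
        rw [this]
      have := hmatch (n - j % n + m) hd1 hd2
      rw [h1, h2] at this
      exact this.symm
  | case2 i j h k hk hgt ih => exact ih
  | case3 i j h k hk hgt ih => exact ih
  | case4 i j h => intro hc; cases hc

-- the cyclic sequence of u, and the rotation of u starting at position a (mod n)
def cyc (u : List Int) (n a : Nat) : Int := pvGet u (a % n)
def rotL (u : List Int) (n a : Nat) : List Int := (List.range n).map (fun t => cyc u n (a + t))

theorem cyc_congr (u : List Int) (n a b : Nat) (h : a % n = b % n) : cyc u n a = cyc u n b := by
  simp [cyc, h]

theorem rotL_congr (u : List Int) (n a b : Nat) (h : a % n = b % n) : rotL u n a = rotL u n b := by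
  unfold rotL
  refine List.map_congr_left ?_
  intro t _
  apply cyc_congr
  rw [Nat.add_mod, h, ← Nat.add_mod]

-- equal up to position m, strictly smaller at m ⇒ lexicographically strictly smaller
theorem lex_map_range (m : Nat) : ∀ (n : Nat) (f g : Nat → Int), m < n →
    (∀ t, t < m → f t = g t) → f m < g m →
    List.Lex (· < ·) ((List.range n).map f) ((List.range n).map g) := by
  induction m with
  | zero =>
    intro n f g hm hpre hlt
    obtain ⟨n', rfl⟩ : ∃ n', n = n' + 1 := ⟨n - 1, by omega⟩
    rw [List.range_succ_eq_map]
    simp only [List.map_cons, List.map_map]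
    exact List.Lex.rel hlt
  | succ m ih =>
    intro n f g hm hpre hlt
    obtain ⟨n', rfl⟩ : ∃ n', n = n' + 1 := ⟨n - 1, by omega⟩
    rw [List.range_succ_eq_map]
    simp only [List.map_cons, List.map_map]
    rw [hpre 0 (by omega)]
    exact List.Lex.cons (ih n' (f ∘ Nat.succ) (g ∘ Nat.succ) (by omega)
      (fun t ht => hpre (t + 1) (by omega)) hlt)

-- after a mismatch where u's symbol is larger, every rotation of u starting in (i, i+K]
-- is lexicographically above the corresponding rotation of v
theorem inv_extend (u' v' : List Int) (n i' j' K : Nat) (_hK1 : 1 ≤ K) (hKn : K ≤ n)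
    (hmatch : ∀ d, 1 ≤ d → d < K → pvGet u' ((i' + d) % n) = pvGet v' ((j' + d) % n))
    (hlt : pvGet v' ((j' + K) % n) < pvGet u' ((i' + K) % n)) :
    ∀ d, d < K → rotL v' n (j' + d + 1) < rotL u' n (i' + d + 1) := by
  intro d hd
  show List.Lex (· < ·) (rotL v' n (j' + d + 1)) (rotL u' n (i' + d + 1))
  apply lex_map_range (K - 1 - d) n _ _ (by omega)
  · intro t ht
    have h1 : (1:Nat) ≤ d + 1 + t := by omega
    have h2 : d + 1 + t < K := by omega
    have hmm := (hmatch (d + 1 + t) h1 h2).symm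
    have e3 : j' + (d + 1 + t) = j' + d + 1 + t := by omega
    have e4 : i' + (d + 1 + t) = i' + d + 1 + t := by omega
    rw [e3, e4] at hmm
    exact hmm
  · show cyc v' n (j' + d + 1 + (K - 1 - d)) < cyc u' n (i' + d + 1 + (K - 1 - d))
    have e1 : j' + d + 1 + (K - 1 - d) = j' + K := by omega
    have e2 : i' + d + 1 + (K - 1 - d) = i' + K := by omega
    rw [e1, e2]
    exact hlt

-- if every rotation of w starting in [1, i] is strictly above μ, but some start below n
-- attains μ and n ≤ i, we have a contradiction ([1, i] covers all residues mod n)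
theorem exit_absurd (w : List Int) (n i : Nat) (μ : List Int)
    (hex : ∃ a, a < n ∧ rotL w n a = μ)
    (hinv : ∀ a, 1 ≤ a → a ≤ i → μ < rotL w n a) (hni : n ≤ i) : False := by
  obtain ⟨a0, ha0, heq⟩ := hex
  have h0 : 0 < n := by omega
  by_cases hz : a0 = 0
  · have h1 := hinv n (by omega) hni
    have h2 : rotL w n n = rotL w n a0 := rotL_congr w n n a0 (by rw [Nat.mod_self, hz, Nat.zero_mod])
    rw [h2, heq] at h1
    exact lt_irrefl _ h1
  · have h1 := hinv a0 (by omega) (by omega)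
    rw [heq] at h1
    exact lt_irrefl _ h1

-- completeness of A's loop, by the minimal-rotation invariant: μ is a common lexicographic
-- minimum attained by both rotation families, and every start the pointers skipped is above μ
theorem pvOuter_complete (u v : List Int) (n : Nat) (μ : List Int)
    (hmu_u : ∀ a, μ ≤ rotL u n a) (hmu_v : ∀ b, μ ≤ rotL v n b)
    (ha : ∃ a, a < n ∧ rotL u n a = μ) (hb : ∃ b, b < n ∧ rotL v n b = μ) :
    ∀ N i j, (n - i) + (n - j) ≤ N →
      (∀ a, 1 ≤ a → a ≤ i → μ < rotL u n a) →
      (∀ b, 1 ≤ b → b ≤ j → μ < rotL v n b) →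
      pvOuter u v n i j = true := by
  intro N
  induction N with
  | zero =>
    intro i j hN hinvU hinvV
    exfalso
    obtain ⟨a0, ha0, heq0⟩ := ha
    exact exit_absurd u n i μ ⟨a0, ha0, heq0⟩ hinvU (by omega)
  | succ N ihN =>
    intro i j hN hinvU hinvV
    rw [pvOuter]
    by_cases hcond : i < n ∧ j < n
    · rw [dif_pos hcond]
      simp only []
      set K := pvInner u v n i j 1 with hKdef
      by_cases hnk : n < K
      · rw [if_pos hnk]
      · rw [if_neg hnk]
        have hK1 : 1 ≤ K := pvInner_ge u v n i j 1
        have hKn : K ≤ n := by omega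
        have hmatch : ∀ d, 1 ≤ d → d < K → pvGet u ((i + d) % n) = pvGet v ((j + d) % n) :=
          fun d h1 h2 => pvInner_match u v n i j 1 d h1 h2
        have hne := pvInner_stop u v n i j 1 hKn
        by_cases hgt : pvGet u ((i + K) % n) > pvGet v ((j + K) % n)
        · rw [if_pos hgt]
          apply ihN (i + K) j (by omega) ?_ hinvV
          intro a h1 h2
          rcases Nat.lt_or_ge a (i+1) with hc | hc
          · exact hinvU a h1 (by omega)
          · have hlex := inv_extend u v n i j K hK1 hKn hmatch hgt (a - i - 1) (by omega)
            have e : i + (a - i - 1) + 1 = a := by omega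
            rw [e] at hlex
            exact lt_of_le_of_lt (hmu_v _) hlex
        · rw [if_neg hgt]
          have hlt : pvGet u ((i + K) % n) < pvGet v ((j + K) % n) :=
            lt_of_le_of_ne (not_lt.mp hgt) hne
          apply ihN i (j + K) (by omega) hinvU ?_
          intro b h1 h2
          rcases Nat.lt_or_ge b (j+1) with hc | hc
          · exact hinvV b h1 (by omega)
          · have hlex := inv_extend v u n j i K hK1 hKn
              (fun d hd1 hd2 => (hmatch d hd1 hd2).symm) hlt (b - j - 1) (by omega)
            have e : j + (b - j - 1) + 1 = b := by omega
            rw [e] at hlex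
            exact lt_of_le_of_lt (hmu_u _) hlex
    · exfalso
      obtain ⟨a0, ha0, heq0⟩ := ha
      rcases Nat.lt_or_ge i n with hci | hci
      · exact exit_absurd v n j μ hb hinvV (by omega)
      · exact exit_absurd u n i μ ⟨a0, ha0, heq0⟩ hinvU hci

-- completeness entry point: if v is a rotation of u, A's loop answers true
theorem pvOuter_true (u v : List Int) (n : Nat) (hn : u.length = n) (hv : v.length = n)
    (s : Nat) (hs : s < n) (hrot : u.drop s ++ u.take s = v) : pvOuter u v n 0 0 = true := by
  have h0 : 0 < n := by omega
  obtain ⟨a0, ha0mem, hmin⟩ := Finset.exists_min_image (Finset.range n) (rotL u n)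
    ⟨0, Finset.mem_range.mpr h0⟩
  have ha0 : a0 < n := Finset.mem_range.mp ha0mem
  have hmod : ∀ (w : List Int) (a : Nat), rotL w n a = rotL w n (a % n) := fun w a =>
    rotL_congr w n a (a % n) (Nat.mod_mod_of_dvd _ dvd_rfl).symm
  have hmu_u : ∀ a, rotL u n a0 ≤ rotL u n a := fun a => by
    rw [hmod u a]
    exact hmin _ (Finset.mem_range.mpr (Nat.mod_lt _ h0))
  have hshift : ∀ b, rotL v n b = rotL u n (s + b) := by
    intro b
    unfold rotL
    refine List.map_congr_left ?_
    intro t _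
    show pvGet v ((b + t) % n) = pvGet u ((s + b + t) % n)
    have h1 : (b + t) % n < n := Nat.mod_lt _ h0
    show v.getD ((b + t) % n) 0 = u.getD ((s + b + t) % n) 0
    rw [← hrot, getD_rot u n s ((b + t) % n) hn hs h1, pvModAddR]
    congr 2
    omega
  have hmu_v : ∀ b, rotL u n a0 ≤ rotL v n b := fun b => by rw [hshift b]; exact hmu_u _
  have hb : ∃ b, b < n ∧ rotL v n b = rotL u n a0 := by
    refine ⟨(n + a0 - s) % n, Nat.mod_lt _ h0, ?_⟩
    rw [hshift, hmod u (s + (n + a0 - s) % n), pvModAddR]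
    have e : (s + (n + a0 - s)) % n = a0 := by
      have e2 : s + (n + a0 - s) = n + a0 := by omega
      rw [e2, Nat.add_mod_left, Nat.mod_eq_of_lt ha0]
    rw [e]
  exact pvOuter_complete u v n (rotL u n a0) hmu_u hmu_v ⟨a0, ha0, rfl⟩ hb (2 * n) 0 0
    (by omega) (fun a h1 h2 => absurd h2 (by omega)) (fun b h1 h2 => absurd h2 (by omega))

-- ===== VERDICT (by name: the statement is the Claim_ definition above) =====
theorem cyclicEquiv_spec : Claim_equal_cyclicEquiv := by
  intro u v _
  unfold Spec_cyclicEquiv cyclicEquiv cyclicEquiv_alt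
  by_cases hL : u.length ≠ v.length
  · rw [if_pos hL, if_pos hL]
  · rw [if_neg hL, if_neg hL]
    have hv : v.length = u.length := by omega
    have hiff : pvOuter u v u.length 0 0 = true ↔
        ((List.range u.length).any (fun i => (u.drop i ++ u.take i) == v)) = true := by
      rw [List.any_eq_true]
      constructor
      · intro h
        obtain ⟨s, hs, hrot⟩ := pvOuter_sound u v u.length rfl hv 0 0 h
        exact ⟨s, List.mem_range.mpr hs, by simpa using hrot⟩
      · rintro ⟨s, hsmem, hrot⟩
        exact pvOuter_true u v u.length rfl hv s (List.mem_range.mp hsmem) (by simpa using hrot)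
    cases h1 : pvOuter u v u.length 0 0
    · cases h2 : (List.range u.length).any (fun i => (u.drop i ++ u.take i) == v)
      · rfl
      · exact absurd (hiff.mpr h2) (by simp [h1])
    · exact (hiff.mp h1).symm
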